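-- pv_equiv track=rewrite | github.com/kganjam/arc-agi-2-solver | arc_enhanced_pattern_learner.py | _infer_color_mapping
-- ===== SOURCE A (Python) =====
-- from typing import List, Dict, Tuple, Optional, Any
--
-- def _infer_color_mapping(inp: List[List[int]], out: List[List[int]]) -> Dict:
--     """Infer color transformation mapping"""
--     inp_flat = [c for row in inp for c in row]
--     out_flat = [c for row in out for c in row]
--
--     if len(inp_flat) == len(out_flat):
--         # Direct mapping possible
--         mapping = {}
--         for i_color, o_color in zip(inp_flat, out_flat):
--             if i_color not in mapping:
--                 mapping[i_color] = o_color
--             elif mapping[i_color] != o_color: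
--                 # Inconsistent mapping
--                 return {}
--         return mapping
--
--     return {}
-- ===== SOURCE B (Python) =====
-- def _infer_color_mapping(inp, out):
--     """Infer color transformation mapping (group-then-validate reimplementation)."""
--     inp_flat = [c for row in inp for c in row]
--     out_flat = [c for row in out for c in row]
--     if len(inp_flat) != len(out_flat):
--         return {}
--     groups = {}
--     for i_color, o_color in zip(inp_flat, out_flat):
--         groups.setdefault(i_color, []).append(o_color)
--     if any(len(set(v)) > 1 for v in groups.values()):
--         return {}
--     return {c: v[0] for c, v in groups.items()}
-- ===== Notes on version B (the rewrite author's own statement) =====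
-- stated objective: alternative
-- what changed: A's single pass with a running dict and an early return on the first conflict becomes a two-phase group-then-validate: one pass groups every output color under its input color (setdefault/append), a second pass rejects any group with more than one distinct color, and the result is rebuilt from the groups' first elements.
import Mathlib
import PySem

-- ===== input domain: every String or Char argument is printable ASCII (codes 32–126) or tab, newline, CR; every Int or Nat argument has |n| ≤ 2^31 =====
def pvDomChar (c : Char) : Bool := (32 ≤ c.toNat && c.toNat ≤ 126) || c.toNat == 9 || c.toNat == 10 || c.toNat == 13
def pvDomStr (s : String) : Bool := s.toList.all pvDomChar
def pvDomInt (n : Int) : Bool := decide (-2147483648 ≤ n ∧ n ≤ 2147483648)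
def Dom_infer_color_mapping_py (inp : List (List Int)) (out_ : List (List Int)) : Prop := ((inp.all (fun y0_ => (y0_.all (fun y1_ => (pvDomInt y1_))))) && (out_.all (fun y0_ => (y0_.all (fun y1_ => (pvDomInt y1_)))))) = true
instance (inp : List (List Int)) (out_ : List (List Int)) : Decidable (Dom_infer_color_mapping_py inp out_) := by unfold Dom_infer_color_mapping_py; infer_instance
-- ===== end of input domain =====

-- B is an alternative decomposition of A (same cost): A's single pass with a running dict and an
-- early return on the first conflict becomes group-then-validate in two separate passes.

-- ===== PORT A =====
-- the 'for i_color, o_color in zip(...)' loop with its early 'return {}'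
def aLoop (zs : List (Int × Int)) (m : PySem.Dict Int Int) : PySem.Dict Int Int :=
  match zs with
  | [] => m
  | (i, o) :: rest =>
    match m.get? i with
    | none => aLoop rest (m.insert i o)
    | some v => if v ≠ o then PySem.Dict.empty else aLoop rest m

def infer_color_mapping_py (inp : List (List Int)) (out_ : List (List Int)) : List (Int × Int) :=
  let inp_flat := inp.flatMap (fun row => row)
  let out_flat := out_.flatMap (fun row => row)
  if inp_flat.length = out_flat.length then
    (aLoop (inp_flat.zip out_flat) PySem.Dict.empty).items
  else []

-- ===== PORT B =====
-- pass 1: groups.setdefault(i_color, []).append(o_color)  (= d[k] = d.get(k, []) ++ [o], i.e. Dict.modify)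
def bGroups (zs : List (Int × Int)) : PySem.Dict Int (List Int) :=
  zs.foldl (fun g p => g.modify p.1 [] (fun v => v ++ [p.2])) PySem.Dict.empty

def infer_color_mapping_py_alt (inp : List (List Int)) (out_ : List (List Int)) : List (Int × Int) :=
  let inp_flat := inp.flatMap (fun row => row)
  let out_flat := out_.flatMap (fun row => row)
  if inp_flat.length ≠ out_flat.length then []
  else
    let g := bGroups (inp_flat.zip out_flat)
    -- pass 2: any(len(set(v)) > 1 for v in groups.values())
    if g.values.any (fun v => PySem.Set.len (PySem.Set.ofList v) > 1) then []
    else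
      -- {c: v[0] for c, v in groups.items()}; every v is nonempty, v[0] ported as pyGetD v 0 0
      g.items.map (fun kv => (kv.1, PySem.List.pyGetD kv.2 0 0))

-- ===== PRECONDITION & SPEC =====
def Spec_infer_color_mapping_py (inp : List (List Int)) (out_ : List (List Int)) (out : List (Int × Int)) : Prop := out = infer_color_mapping_py_alt inp out_
instance (inp : List (List Int)) (out_ : List (List Int)) (out : List (Int × Int)) : Decidable (Spec_infer_color_mapping_py inp out_ out) := by unfold Spec_infer_color_mapping_py; infer_instance

-- ===== CLAIM (what is proved, stated in full; the proofs are below) =====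
def Claim_equal_infer_color_mapping_py : Prop := ∀ (inp : List (List Int)) (out_ : List (List Int)), Dom_infer_color_mapping_py inp out_ → Spec_infer_color_mapping_py inp out_ (infer_color_mapping_py inp out_)

-- ===== LEMMAS AND PROOFS =====

-- zs is consistent: equal input colors always map to equal output colors
def consistB (zs : List (Int × Int)) : Bool :=
  zs.all (fun p => zs.all (fun q => !(p.1 == q.1) || (p.2 == q.2)))

-- m is compatible with zs: m either lacks a pair's key or already maps it to that pair's value
def compatB (m : PySem.Dict Int Int) (zs : List (Int × Int)) : Bool :=
  zs.all (fun p => (m.get? p.1).all (fun v => v == p.2))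

theorem consistB_iff (zs : List (Int × Int)) :
    consistB zs = true ↔ ∀ p ∈ zs, ∀ q ∈ zs, p.1 = q.1 → p.2 = q.2 := by
  simp [consistB, List.all_eq_true, imp_iff_not_or]

theorem compatB_iff (m : PySem.Dict Int Int) (zs : List (Int × Int)) :
    compatB m zs = true ↔ ∀ p ∈ zs, ∀ v, m.get? p.1 = some v → v = p.2 := by
  simp only [compatB, List.all_eq_true]
  constructor
  · intro h p hp v hv
    have := h p hp
    rw [hv] at this
    simpa using this
  · intro h p hp
    cases hv : m.get? p.1 with
    | none => simp
    | some v => simpa using h p hp v hv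

-- A's loop = "all-or-nothing": the setdefault fold if consistent & compatible, else {}
theorem aLoop_eq (zs : List (Int × Int)) : ∀ (m : PySem.Dict Int Int),
    aLoop zs m = if compatB m zs && consistB zs
      then zs.foldl (fun m p => m.setdefault p.1 p.2) m else PySem.Dict.empty := by
  induction zs with
  | nil => intro m; simp [aLoop, compatB, consistB]
  | cons p rest ih =>
    obtain ⟨i, o⟩ := p
    intro m
    cases h : m.get? i with
    | none =>
      have hmc : m.contains i = false := by
        rw [PySem.Dict.contains_eq_isSome_get?, h]; rfl
      have hcond : (compatB (m.insert i o) rest && consistB rest)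
          = (compatB m ((i, o) :: rest) && consistB ((i, o) :: rest)) := by
        rw [Bool.eq_iff_iff]
        simp only [Bool.and_eq_true, compatB_iff, consistB_iff, List.mem_cons]
        constructor
        · rintro ⟨hcp, hcs⟩
          refine ⟨?_, ?_⟩
          · rintro p (rfl | hp) v hv
            · rw [h] at hv; cases hv
            · by_cases hpi : p.1 = i
              · rw [hpi, h] at hv; cases hv
              · exact hcp p hp v (by rw [PySem.Dict.get?_insert_of_ne _ _ hpi]; exact hv)
          · rintro p (rfl | hp) q (rfl | hq) heq
            · rfl
            · exact hcp q hq o (by rw [← heq]; exact PySem.Dict.get?_insert_self m i o)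
            · exact (hcp p hp o (by rw [heq]; exact PySem.Dict.get?_insert_self m i o)).symm
            · exact hcs p hp q hq heq
        · rintro ⟨hcp, hcs⟩
          refine ⟨?_, fun p hp q hq => hcs p (Or.inr hp) q (Or.inr hq)⟩
          intro p hp v hv
          by_cases hpi : p.1 = i
          · rw [hpi, PySem.Dict.get?_insert_self] at hv
            cases hv
            exact (hcs ⟨i, o⟩ (Or.inl rfl) p (Or.inr hp) hpi.symm)
          · rw [PySem.Dict.get?_insert_of_ne _ _ hpi] at hv
            exact hcp p (Or.inr hp) v hv
      have hstep : aLoop ((i, o) :: rest) m = aLoop rest (m.insert i o) := by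
        simp [aLoop, h]
      rw [hstep, ih, hcond, List.foldl_cons,
        PySem.Dict.setdefault_of_not_contains _ _ hmc]
    | some v =>
      have hmc : m.contains i = true := by
        rw [PySem.Dict.contains_eq_isSome_get?, h]; rfl
      by_cases hvo : v = o
      · subst hvo
        have hstep : aLoop ((i, v) :: rest) m = aLoop rest m := by
          simp [aLoop, h]
        have hcond : (compatB m rest && consistB rest)
            = (compatB m ((i, v) :: rest) && consistB ((i, v) :: rest)) := by
          rw [Bool.eq_iff_iff]
          simp only [Bool.and_eq_true, compatB_iff, consistB_iff, List.mem_cons]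
          constructor
          · rintro ⟨hcp, hcs⟩
            refine ⟨?_, ?_⟩
            · rintro p (rfl | hp) w hw
              · rw [h] at hw; cases hw; rfl
              · exact hcp p hp w hw
            · rintro p (rfl | hp) q (rfl | hq) heq
              · rfl
              · exact hcp q hq v (by rw [← heq]; exact h)
              · exact (hcp p hp v (by rw [heq]; exact h)).symm
              · exact hcs p hp q hq heq
          · rintro ⟨hcp, hcs⟩
            exact ⟨fun p hp w hw => hcp p (Or.inr hp) w hw,
              fun p hp q hq heq => hcs p (Or.inr hp) q (Or.inr hq) heq⟩
        rw [hstep, ih, hcond, List.foldl_cons,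
          PySem.Dict.setdefault_of_contains _ _ hmc]
      · have hstep : aLoop ((i, o) :: rest) m = PySem.Dict.empty := by
          simp [aLoop, h, hvo]
        have hcf : compatB m ((i, o) :: rest) = false := by
          rw [Bool.eq_false_iff]
          intro hc
          exact hvo ((compatB_iff m _).1 hc (i, o) (List.mem_cons_self) v h)
        rw [hstep, hcf]
        simp

-- the setdefault fold and the group fold stay in lock-step: items of the former are
-- (key, first element) of items of the latter
theorem rel (zs : List (Int × Int)) : ∀ (m : PySem.Dict Int Int) (g : PySem.Dict Int (List Int)),
    g.keys.Nodup → (∀ kv ∈ g.items, kv.2 ≠ []) →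
    m.items = g.items.map (fun kv => (kv.1, kv.2.headD 0)) →
    (zs.foldl (fun m p => m.setdefault p.1 p.2) m).items
      = (zs.foldl (fun g p => g.modify p.1 [] (fun v => v ++ [p.2])) g).items.map
          (fun kv => (kv.1, kv.2.headD 0)) := by
  induction zs with
  | nil => intro m g _ _ hitems; simpa using hitems
  | cons p rest ih =>
    obtain ⟨c, o⟩ := p
    intro m g hnd hne hitems
    have hcont : ∀ k, m.contains k = g.contains k := by
      intro k
      simp only [PySem.Dict.contains, hitems, List.any_map]
      rfl
    simp only [List.foldl_cons]
    by_cases hc : g.contains c = true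
    · have hmc : m.contains c = true := by rw [hcont]; exact hc
      rw [PySem.Dict.setdefault_of_contains _ _ hmc, PySem.Dict.modify]
      apply ih
      · exact PySem.Dict.nodup_keys_insert _ _ _ hnd
      · intro kv hkv
        rcases (PySem.Dict.mem_items_insert _ _ _ _).1 hkv with hkv | hkv
        · subst hkv; simp
        · exact hne _ hkv.1
      · rw [PySem.Dict.items_insert_of_contains _ _ hc, hitems, List.map_map]
        apply List.map_congr_left
        intro q hq
        by_cases hqc : q.1 = c
        · have hqv : g.getD c [] = q.2 := by
            rw [← hqc]
            exact PySem.Dict.getD_of_mem_items _ (by simpa using hq) hnd []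
          cases hq2 : q.2 with
          | nil => exact absurd hq2 (hne q hq)
          | cons a t =>
            rw [hqv, hq2]
            simp [Function.comp, hqc]
        · simp [Function.comp, hqc]
    · have hmc : m.contains c = false := by rw [hcont]; simpa using hc
      rw [PySem.Dict.setdefault_of_not_contains _ _ hmc, PySem.Dict.modify]
      apply ih
      · exact PySem.Dict.nodup_keys_insert _ _ _ hnd
      · intro kv hkv
        rcases (PySem.Dict.mem_items_insert _ _ _ _).1 hkv with hkv | hkv
        · subst hkv; simp
        · exact hne _ hkv.1
      · rw [PySem.Dict.items_insert_of_not_contains _ _ hmc,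
          PySem.Dict.items_insert_of_not_contains _ _ (show g.contains c = false by simpa using hc),
          PySem.Dict.getD_of_not_contains _ _ (show g.contains c = false by simpa using hc)]
        simp [hitems]

theorem foldl_add_of_mem (xs : List Int) : ∀ (s : PySem.Set Int),
    (∀ a ∈ xs, s.contains a = true) → xs.foldl PySem.Set.add s = s := by
  induction xs with
  | nil => intro s _; rfl
  | cons x xs ih =>
    intro s h
    have hmem : x ∈ s := by
      have := h x List.mem_cons_self
      simpa using this
    have hx : PySem.Set.add s x = s := by
      simp [PySem.Set.add, hmem]
    rw [List.foldl_cons, hx]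
    exact ih s (fun a ha => h a (List.mem_cons_of_mem _ ha))

theorem ofList_len_le_one_iff (l : List Int) :
    (PySem.Set.ofList l).length ≤ 1 ↔ ∀ a ∈ l, ∀ b ∈ l, a = b := by
  constructor
  · intro h a ha b hb
    have ha' := (PySem.Set.mem_ofList l a).2 ha
    have hb' := (PySem.Set.mem_ofList l b).2 hb
    rcases hs : PySem.Set.ofList l with _ | ⟨x, _ | ⟨y, t⟩⟩
    · rw [hs] at ha'; cases ha'
    · rw [hs] at ha' hb'
      simp at ha' hb'
      rw [ha', hb']
    · rw [hs] at h; simp at h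
  · intro h
    cases l with
    | nil => simp [PySem.Set.ofList, PySem.Set.empty]
    | cons x xs =>
      have : PySem.Set.ofList (x :: xs) = [x] := by
        show List.foldl PySem.Set.add PySem.Set.empty (x :: xs) = [x]
        rw [List.foldl_cons]
        have h1 : PySem.Set.add PySem.Set.empty x = [x] := rfl
        rw [h1]
        apply foldl_add_of_mem
        intro a ha
        have : a = x := h a (List.mem_cons_of_mem _ ha) x (List.mem_cons_self)
        simp [this]
      rw [this]
      simp

theorem nodup_keys_bGroups (zs : List (Int × Int)) : (bGroups zs).keys.Nodup := by
  apply PySem.Dict.nodup_keys_foldl_modify_key zs (fun p => p.1) [] (fun _ p v => v ++ [p.2])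
  simp [PySem.Dict.empty, PySem.Dict.keys]

theorem keys_bGroups (zs : List (Int × Int)) :
    (bGroups zs).keys = PySem.Set.ofList (zs.map (fun p => p.1)) := by
  rw [bGroups, PySem.Dict.keys_foldl_modify_key zs (fun p => p.1) [] (fun _ p v => v ++ [p.2])]
  rfl

theorem getD_bGroups (zs : List (Int × Int)) (c : Int) :
    (bGroups zs).getD c [] = (zs.filter (fun p => p.1 == c)).map (fun p => p.2) := by
  rw [bGroups, PySem.Dict.getD_foldl_modify_append]
  simp [PySem.Dict.getD_empty]

-- B's validation pass detects exactly the inconsistent zip lists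
theorem anyBad_iff (zs : List (Int × Int)) :
    ((bGroups zs).values.any (fun v => PySem.Set.len (PySem.Set.ofList v) > 1)) = !consistB zs := by
  rw [Bool.eq_iff_iff]
  rw [Bool.not_eq_true', Bool.eq_false_iff, Ne, consistB_iff]
  rw [PySem.Dict.values_eq_map_keys _ (nodup_keys_bGroups zs) []]
  simp only [List.any_map, List.any_eq_true, Function.comp_apply, decide_eq_true_eq]
  constructor
  · rintro ⟨c, hc, hbad⟩ hcons
    rw [getD_bGroups] at hbad
    have : ∀ a ∈ (zs.filter (fun p => p.1 == c)).map (fun p => p.2),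
        ∀ b ∈ (zs.filter (fun p => p.1 == c)).map (fun p => p.2), a = b := by
      rintro a ha b hb
      obtain ⟨p, hp, rfl⟩ := List.mem_map.1 ha
      obtain ⟨q, hq, rfl⟩ := List.mem_map.1 hb
      rw [List.mem_filter] at hp hq
      exact hcons p hp.1 q hq.1 (by
        have h1 : p.1 = c := by simpa using hp.2
        have h2 : q.1 = c := by simpa using hq.2
        rw [h1, h2])
    have hle := (ofList_len_le_one_iff _).2 this
    simp only [PySem.Set.len] at hbad
    omega
  · intro hcons
    push Not at hcons
    obtain ⟨p, hp, q, hq, heq, hne⟩ := hcons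
    refine ⟨p.1, ?_, ?_⟩
    · rw [keys_bGroups, PySem.Set.mem_ofList]
      exact List.mem_map_of_mem hp
    · rw [getD_bGroups]
      have hlen : ¬ (PySem.Set.ofList ((zs.filter (fun r => r.1 == p.1)).map (fun r => r.2))).length ≤ 1 := by
        intro hle
        have hall := (ofList_len_le_one_iff _).1 hle
        have hpmem : p.2 ∈ (zs.filter (fun r => r.1 == p.1)).map (fun r => r.2) :=
          List.mem_map_of_mem (by simp [List.mem_filter, hp])
        have hqmem : q.2 ∈ (zs.filter (fun r => r.1 == p.1)).map (fun r => r.2) :=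
          List.mem_map_of_mem (by simp [List.mem_filter, hq, heq])
        exact hne (hall p.2 hpmem q.2 hqmem)
      simp only [PySem.Set.len]
      omega

-- ===== VERDICT (by name: the statement is the Claim_ definition above) =====
theorem pyGetD_zero_headD (l : List Int) : PySem.List.pyGetD l 0 0 = l.headD 0 := by
  rw [PySem.List.pyGetD_zero]
  cases l <;> simp

theorem infer_color_mapping_py_spec : Claim_equal_infer_color_mapping_py := by
  intro inp out_ _
  unfold Spec_infer_color_mapping_py
  simp only [infer_color_mapping_py, infer_color_mapping_py_alt]
  by_cases hlen : (inp.flatMap (fun row => row)).length = (out_.flatMap (fun row => row)).length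
  · rw [if_pos hlen, if_neg (not_ne_iff.2 hlen)]
    set zs := (inp.flatMap (fun row => row)).zip (out_.flatMap (fun row => row)) with hzs
    rw [aLoop_eq]
    have hcompat : compatB PySem.Dict.empty zs = true := by
      simp [compatB, PySem.Dict.get?_empty, List.all_eq_true]
    rw [hcompat, Bool.true_and]
    cases hcons : consistB zs with
    | false =>
      have hany : ((bGroups zs).values.any
          (fun v => PySem.Set.len (PySem.Set.ofList v) > 1)) = true := by
        rw [anyBad_iff, hcons]; rfl
      rw [if_neg (by simp), if_pos hany]
      rfl
    | true =>
      have hany : ((bGroups zs).values.any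
          (fun v => PySem.Set.len (PySem.Set.ofList v) > 1)) = false := by
        rw [anyBad_iff, hcons]; rfl
      have hnot : ¬ ((bGroups zs).values.any
          (fun v => PySem.Set.len (PySem.Set.ofList v) > 1) = true) := by
        rw [hany]; simp
      rw [if_pos rfl, if_neg hnot]
      have hrel := rel zs PySem.Dict.empty PySem.Dict.empty
        (by simp [PySem.Dict.empty, PySem.Dict.keys])
        (by simp [PySem.Dict.empty])
        (by simp [PySem.Dict.empty])
      have hfun : (fun kv : Int × List Int => (kv.1, PySem.List.pyGetD kv.2 0 0))
          = (fun kv => (kv.1, kv.2.headD 0)) := funext (fun kv => by rw [pyGetD_zero_headD])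
      rw [hfun]
      exact hrel
  · rw [if_neg hlen, if_pos hlen]
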